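-- pv_equiv track=rewrite | github.com/CheesiePy/Python_for_BioData | home_work3/main.py | check_reading_frame
-- ===== SOURCE A (Python) =====
-- def check_reading_frame(seq):
--     """return true if seq is valid"""
--     valid_chars = "ATCG"
--
--     for char in seq:
--         if char not in valid_chars:
--             return False
--
--     if len(seq) % 3 != 0:
--         return False
--
--     valid_ending = ["TAG", "TAA", "TGA"]
--     valid_start = "ATG"
--
--     if seq[:3] != valid_start:
--         return False
--
--     if seq[-3:] not in valid_ending:
--         return False
--
--     return True
-- ===== SOURCE B (Python) =====
-- def check_reading_frame(seq):
--     """return true if seq is valid (single left-to-right pass with a rolling window)"""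
--     stops = ("TAG", "TAA", "TGA")
--     ok = True
--     last3 = ""
--     for i, ch in enumerate(seq):
--         if ch not in "ATCG" or (i < 3 and ch != "ATG"[i]):
--             ok = False
--         last3 = (last3 + ch)[-3:]
--     return ok and len(seq) % 3 == 0 and last3 in stops
-- ===== Notes on version B (the rewrite author's own statement) =====
-- stated objective: alternative
-- what changed: Replaces A's char-validity loop followed by length and slice comparisons with a single left-to-right scan that checks validity and the ATG prefix positionally while maintaining a rolling last-3-characters window, deciding everything in one pass without slicing the input.
import Mathlib
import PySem

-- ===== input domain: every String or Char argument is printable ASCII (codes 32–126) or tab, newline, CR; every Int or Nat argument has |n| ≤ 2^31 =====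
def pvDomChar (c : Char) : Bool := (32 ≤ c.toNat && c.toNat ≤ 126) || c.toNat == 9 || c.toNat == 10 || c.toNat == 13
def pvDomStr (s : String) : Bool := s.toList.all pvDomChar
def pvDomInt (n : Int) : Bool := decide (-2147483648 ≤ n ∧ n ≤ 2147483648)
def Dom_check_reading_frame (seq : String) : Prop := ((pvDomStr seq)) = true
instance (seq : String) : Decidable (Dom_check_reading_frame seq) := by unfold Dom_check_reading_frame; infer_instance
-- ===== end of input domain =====

-- B replaces A's validity loop plus slice comparisons by one left-to-right scan with a
-- rolling last-3 window (objective: alternative single-pass formulation; same O(n) cost).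

-- ===== PORT A =====
def pvValid : List Char := ['A', 'T', 'C', 'G']
def pvATG : List Char := ['A', 'T', 'G']
def pvStops : List (List Char) := [['T','A','G'], ['T','A','A'], ['T','G','A']]

-- the early-returning `for char in seq` loop
def aCharLoop : List Char → Bool
  | [] => true
  | c :: rest => if pvValid.contains c = false then false else aCharLoop rest

def check_reading_frame (seq : String) : Bool :=
  let l := seq.toList
  if aCharLoop l = false then false
  else if l.length % 3 ≠ 0 then false                                    -- len(seq) % 3 != 0 (len ≥ 0)
  else if PySem.List.slice l none (some 3) ≠ pvATG then false            -- seq[:3] != "ATG"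
  else if pvStops.contains (PySem.List.slice l (some (-3)) none) = false -- seq[-3:] not in valid_ending
    then false
  else true

-- ===== PORT B =====
-- last3 = (last3 + ch)[-3:]
def bRoll (s : List Char) (c : Char) : List Char :=
  PySem.List.slice (s ++ [c]) (some (-3)) none

-- the `for i, ch in enumerate(seq)` loop carrying (ok, last3)
def bLoop : Nat → Bool → List Char → List Char → Bool × List Char
  | _, ok, last3, [] => (ok, last3)
  | i, ok, last3, c :: rest =>
      bLoop (i + 1)
        (if pvValid.contains c = false ∨ (i < 3 ∧ c ≠ pvATG.getD i ' ') then false else ok)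
        (bRoll last3 c) rest

def check_reading_frame_alt (seq : String) : Bool :=
  let r := bLoop 0 true [] seq.toList
  r.1 && (seq.toList.length % 3 == 0) && pvStops.contains r.2

-- ===== PRECONDITION & SPEC =====
def Spec_check_reading_frame (seq : String) (out : Bool) : Prop := out = check_reading_frame_alt seq
instance (seq : String) (out : Bool) : Decidable (Spec_check_reading_frame seq out) := by unfold Spec_check_reading_frame; infer_instance

-- ===== CLAIM (what is proved, stated in full; the proofs are below) =====
def Claim_equal_check_reading_frame : Prop := ∀ (seq : String), Dom_check_reading_frame seq → Spec_check_reading_frame seq (check_reading_frame seq)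

-- ===== LEMMAS AND PROOFS =====

def lastN3 (l : List Char) : List Char := l.drop (l.length - 3)

theorem slice_neg3 (l : List Char) : PySem.List.slice l (some (-3)) none = lastN3 l := by
  rw [PySem.List.slice_from_neg_ofNat l 3 (by omega)]; rfl

theorem bRoll_eq (s : List Char) (c : Char) : bRoll s c = lastN3 (s ++ [c]) := slice_neg3 _

theorem lastN3_of_le (l : List Char) (h : l.length ≤ 3) : lastN3 l = l := by
  simp [lastN3, Nat.sub_eq_zero_of_le h]

theorem lastN3_len (l : List Char) : (lastN3 l).length ≤ 3 := by
  simp [lastN3]; omega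

theorem lastN3_cons (a : Char) (y l : List Char) (hy : y.length = 3) :
    lastN3 ((a :: y) ++ l) = lastN3 (y ++ l) := by
  simp only [lastN3, List.cons_append, List.length_cons, List.length_append, hy]
  have h1 : 3 + l.length + 1 - 3 = l.length + 1 := by omega
  have h2 : 3 + l.length - 3 = l.length := by omega
  rw [h1, h2, List.drop_succ_cons]

theorem lastN3_append_lastN3 (x l : List Char) (hx : x.length ≤ 4) :
    lastN3 (lastN3 x ++ l) = lastN3 (x ++ l) := by
  by_cases h : x.length ≤ 3
  · rw [lastN3_of_le x h]
  · replace h : 3 < x.length := by omega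
    cases x with
    | nil => simp at h
    | cons a y =>
        have hy : y.length = 3 := by simp at hx h; omega
        have hxy : lastN3 (a :: y) = y := by
          simp [lastN3, hy]
        rw [hxy, lastN3_cons a y l hy]

theorem bLoop_snd : ∀ (l : List Char) (i : Nat) (ok : Bool) (s : List Char),
    s.length ≤ 3 → (bLoop i ok s l).2 = lastN3 (s ++ l) := by
  intro l
  induction l with
  | nil => intro i ok s hs; simp [bLoop, lastN3_of_le s hs]
  | cons c rest ih =>
      intro i ok s hs
      have hlen : (bRoll s c).length ≤ 3 := by rw [bRoll_eq]; exact lastN3_len _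
      simp only [bLoop]
      rw [ih _ _ _ hlen, bRoll_eq, lastN3_append_lastN3 (s ++ [c]) rest (by simp; omega)]
      simp

-- the ok-flag computed from position i onward
def okSpec : Nat → List Char → Bool
  | _, [] => true
  | i, c :: rest =>
      (if pvValid.contains c = false ∨ (i < 3 ∧ c ≠ pvATG.getD i ' ') then false else true)
        && okSpec (i + 1) rest

theorem bLoop_fst : ∀ (l : List Char) (i : Nat) (ok : Bool) (s : List Char),
    (bLoop i ok s l).1 = (ok && okSpec i l) := by
  intro l
  induction l with
  | nil => intro i ok s; simp [bLoop, okSpec]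
  | cons c rest ih =>
      intro i ok s
      simp only [bLoop, okSpec]
      rw [ih]
      cases ok <;> simp

theorem okSpec_ge3 : ∀ (l : List Char) (i : Nat), 3 ≤ i →
    okSpec i l = l.all (pvValid.contains ·) := by
  intro l
  induction l with
  | nil => intro i _; simp [okSpec]
  | cons c rest ih =>
      intro i hi
      have : ¬ i < 3 := by omega
      simp only [okSpec, List.all_cons]
      rw [ih (i + 1) (by omega)]
      simp [this]

theorem aCharLoop_all : ∀ (l : List Char), aCharLoop l = l.all (pvValid.contains ·) := by
  intro l
  induction l with
  | nil => rfl
  | cons c rest ih =>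
      simp only [aCharLoop, List.all_cons]
      simp [ih]

theorem core (l : List Char) :
    (if aCharLoop l = false then false
     else if l.length % 3 ≠ 0 then false
     else if PySem.List.slice l none (some 3) ≠ pvATG then false
     else if pvStops.contains (PySem.List.slice l (some (-3)) none) = false then false
     else true)
    = ((bLoop 0 true [] l).1 && (l.length % 3 == 0) && pvStops.contains (bLoop 0 true [] l).2) := by
  have hslice3 : PySem.List.slice l none (some 3) = l.take 3 := by
    simpa using PySem.List.slice_to_natCast l 3
  rw [hslice3, slice_neg3, bLoop_fst, bLoop_snd l 0 true [] (by simp), List.nil_append]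
  match l with
  | [] => decide
  | [a] =>
      simp [aCharLoop, okSpec]
  | [a, b] =>
      cases ha : pvValid.contains a <;> cases hb : pvValid.contains b <;>
        simp only [aCharLoop, okSpec, ha, hb] <;> simp
  | a :: b :: c :: rest =>
      rw [aCharLoop_all]
      have hok : okSpec 0 (a :: b :: c :: rest)
          = ((a == 'A') && ((b == 'T') && ((c == 'G') && rest.all (pvValid.contains ·)))) := by
        simp only [okSpec]
        rw [okSpec_ge3 rest 3 (by omega)]
        by_cases ha : a = 'A' <;> by_cases hb : b = 'T' <;> by_cases hc : c = 'G' <;>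
          simp [ha, hb, hc, pvATG, pvValid]
      rw [hok]
      by_cases ha : a = 'A' <;> by_cases hb : b = 'T' <;> by_cases hc : c = 'G' <;>
        simp [ha, hb, hc, pvValid] <;>
        simp_all <;> rw [Bool.eq_iff_iff] <;> simp [List.all_eq_true, pvATG, or_iff_not_imp_left] <;> tauto

-- ===== VERDICT (by name: the statement is the Claim_ definition above) =====
theorem check_reading_frame_spec : Claim_equal_check_reading_frame := by
  intro seq _
  show check_reading_frame seq = check_reading_frame_alt seq
  simp only [check_reading_frame, check_reading_frame_alt]
  exact core seq.toList
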